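-- pv_equiv track=rewrite | github.com/marlboromoo/basinboa | basinboa/rpg/ability.py | modifier
-- ===== SOURCE A (Python) =====
-- MODIFIER_BASE = (10, 11)
--
-- def modifier(ability):
--     """
--     ability     modifier
--     4-5         -3
--     6-7         -2
--     8-9         -1
--     10-11       0
--     12-13       +1
--     14-15       +2
--     16-17       +3
--     18-19       +4
--     20-21       +5
--     """
--     start, end = MODIFIER_BASE
--     if ability >= start and ability <= end:
--         return ability
--     if ability < start:
--         mod_start = start
--         mod = 0
--         while ability < mod_start:
--             mod_start -= 2
--             mod -= 1
--         return mod
--     if ability > end: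
--         mod_end = end
--         mod = 0
--         while ability > mod_end:
--             mod_end += 2
--             mod += 1
--         return mod
-- ===== SOURCE B (Python) =====
-- def modifier(ability):
--     if 10 <= ability <= 11:
--         return ability
--     if ability < 10:
--         return -((11 - ability) // 2)
--     return (ability - 10) // 2
-- ===== Notes on version B (the rewrite author's own statement) =====
-- stated objective: simpler
-- what changed: Replaced both step-by-2 counting while-loops with closed-form floor-division arithmetic, keeping A's initial flat-band range guard (which returns the ability itself) first.
import Mathlib
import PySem

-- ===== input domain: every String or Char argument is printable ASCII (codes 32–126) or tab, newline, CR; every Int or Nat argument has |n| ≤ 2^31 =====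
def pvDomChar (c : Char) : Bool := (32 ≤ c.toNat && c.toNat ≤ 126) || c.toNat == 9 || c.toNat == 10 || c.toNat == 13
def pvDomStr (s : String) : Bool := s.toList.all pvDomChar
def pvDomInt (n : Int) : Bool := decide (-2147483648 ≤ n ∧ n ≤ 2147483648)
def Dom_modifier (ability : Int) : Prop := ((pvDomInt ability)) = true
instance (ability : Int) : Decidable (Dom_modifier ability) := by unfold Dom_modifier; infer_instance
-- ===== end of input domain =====

-- B replaces A's two step-by-2 counting loops with closed-form floor-division arithmetic (simpler; same 10-11 range guard first).


-- ===== PORT A =====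
-- while ability < mod_start: mod_start -= 2; mod -= 1
def modifierLoopDown (ability mod_start mod : Int) : Int :=
  if ability < mod_start then modifierLoopDown ability (mod_start - 2) (mod - 1) else mod
  termination_by (mod_start - ability).toNat
  decreasing_by omega

-- while ability > mod_end: mod_end += 2; mod += 1
def modifierLoopUp (ability mod_end mod : Int) : Int :=
  if ability > mod_end then modifierLoopUp ability (mod_end + 2) (mod + 1) else mod
  termination_by (ability - mod_end).toNat
  decreasing_by omega

def modifier (ability : Int) : Int :=
  if ability ≥ 10 ∧ ability ≤ 11 then ability
  else if ability < 10 then modifierLoopDown ability 10 0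
  else modifierLoopUp ability 11 0   -- final 'if ability > end' always holds when reached

-- ===== PORT B =====
def modifier_alt (ability : Int) : Int :=
  if 10 ≤ ability ∧ ability ≤ 11 then ability
  else if ability < 10 then -(PySem.Int.floordiv (11 - ability) 2)
  else PySem.Int.floordiv (ability - 10) 2

-- ===== PRECONDITION & SPEC =====
def Spec_modifier (ability : Int) (out : Int) : Prop := out = modifier_alt ability
instance (ability : Int) (out : Int) : Decidable (Spec_modifier ability out) := by unfold Spec_modifier; infer_instance

-- ===== CLAIM (what is proved, stated in full; the proofs are below) =====
def Claim_equal_modifier : Prop := ∀ (ability : Int), Dom_modifier ability → Spec_modifier ability (modifier ability)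

-- ===== LEMMAS AND PROOFS =====
theorem modifierLoopDown_eq (a s m : Int) :
    modifierLoopDown a s m = if a < s then m - (s - a + 1) / 2 else m := by
  fun_induction modifierLoopDown a s m with
  | case1 s m h ih =>
    rw [ih]
    split_ifs with h2 <;> omega
  | case2 s m h =>
    simp [h]

theorem modifierLoopUp_eq (a e m : Int) :
    modifierLoopUp a e m = if a > e then m + (a - e + 1) / 2 else m := by
  fun_induction modifierLoopUp a e m with
  | case1 e m h ih =>
    rw [ih]
    split_ifs with h2 <;> omega
  | case2 e m h =>
    simp [h]

-- ===== VERDICT (by name: the statement is the Claim_ definition above) =====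
theorem modifier_spec : Claim_equal_modifier := by
  intro a _
  unfold Spec_modifier modifier modifier_alt
  rw [PySem.Int.floordiv_eq_ediv_of_pos (by omega), PySem.Int.floordiv_eq_ediv_of_pos (by omega),
    modifierLoopDown_eq, modifierLoopUp_eq]
  split_ifs <;> omega
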